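-- pv_equiv track=rewrite | github.com/Hwclub1105/Karaca-s-Encryption-algorithm | main.py | karaca_decrypt
-- ===== SOURCE A (Python) =====
-- def karaca_decrypt(msg):
--     msg = msg[0:-3]
--     replacement = ['0', '1', '2', '3', '4']
--     vowel = ['a', 'e', 'i', 'o', 'u']
--     for i in range(5):
--         msg = msg.replace(replacement[i],vowel[i])
--     msg = msg[::-1]
--     return msg
-- ===== SOURCE B (Python) =====
-- def karaca_decrypt(msg):
--     table = {'0': 'a', '1': 'e', '2': 'i', '3': 'o', '4': 'u'}
--     stripped = msg[:-3]
--     return ''.join(table.get(c, c) for c in reversed(stripped))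
-- ===== Notes on version B (the rewrite author's own statement) =====
-- stated objective: simpler
-- what changed: Replaces A's five sequential whole-string .replace scans plus a final slice-reverse with a single reverse-order character pass over the stripped string using a digit-to-vowel lookup table.
import Mathlib
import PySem

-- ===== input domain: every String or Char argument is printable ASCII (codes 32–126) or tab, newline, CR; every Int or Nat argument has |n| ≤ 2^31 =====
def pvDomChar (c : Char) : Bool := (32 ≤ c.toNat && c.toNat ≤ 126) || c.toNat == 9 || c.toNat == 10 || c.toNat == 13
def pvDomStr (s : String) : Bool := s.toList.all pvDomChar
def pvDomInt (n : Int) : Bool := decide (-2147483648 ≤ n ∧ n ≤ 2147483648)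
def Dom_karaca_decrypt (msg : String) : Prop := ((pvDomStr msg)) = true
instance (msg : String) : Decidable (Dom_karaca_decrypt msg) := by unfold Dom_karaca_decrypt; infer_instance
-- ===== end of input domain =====

-- B replaces A's five sequential whole-string .replace scans plus a final slice-reverse
-- with a single reverse-order character pass over the stripped string using a lookup table.

-- ===== PORT A =====
def karaca_decrypt (msg : String) : String :=
  let msg1 := PySem.Str.slice msg (some 0) (some (-3))
  let replacement : List String := ["0", "1", "2", "3", "4"]
  let vowel : List String := ["a", "e", "i", "o", "u"]
  let msg2 := (PySem.List.pyRange 0 5 1).foldl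
    (fun m i =>
      PySem.Str.replace m (PySem.List.pyGetD replacement i "") (PySem.List.pyGetD vowel i "")) msg1
  (PySem.Str.slice? msg2 none none (-1)).getD ""

-- ===== PORT B =====
def karaca_decrypt_alt (msg : String) : String :=
  let table : PySem.Dict Char Char :=
    PySem.Dict.ofList [('0', 'a'), ('1', 'e'), ('2', 'i'), ('3', 'o'), ('4', 'u')]
  let stripped := PySem.Str.slice msg none (some (-3))
  String.ofList (stripped.toList.reverse.map (fun c => table.getD c c))

-- ===== PRECONDITION & SPEC =====
def Spec_karaca_decrypt (msg : String) (out : String) : Prop := out = karaca_decrypt_alt msg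
instance (msg : String) (out : String) : Decidable (Spec_karaca_decrypt msg out) := by unfold Spec_karaca_decrypt; infer_instance

-- ===== CLAIM (what is proved, stated in full; the proofs are below) =====
def Claim_equal_karaca_decrypt : Prop := ∀ (msg : String), Dom_karaca_decrypt msg → Spec_karaca_decrypt msg (karaca_decrypt msg)

-- ===== LEMMAS AND PROOFS =====

-- replace.go with a single-character pattern is a pointwise map (given enough fuel)
theorem go_single (c d : Char) :
    ∀ (l : List Char) (fuel : Nat) (acc : List Char), l.length ≤ fuel →
      PySem.Chars.replace.go [c] [d] fuel l acc
        = acc.reverse ++ l.map (fun x => if x = c then d else x) := by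
  intro l
  induction l with
  | nil =>
      intro fuel acc _
      cases fuel <;> simp [PySem.Chars.replace.go]
  | cons c' t ih =>
      intro fuel acc hle
      cases fuel with
      | zero => simp at hle
      | succ n =>
        simp only [PySem.Chars.replace.go]
        by_cases h : c = c'
        · subst h
          rw [if_pos (by simp [List.isPrefixOf])]
          show PySem.Chars.replace.go [c] [d] n t (d :: acc) = _
          rw [ih n (d :: acc) (by simpa using hle)]
          simp
        · have hne : ¬ c' = c := fun he => h he.symm
          rw [if_neg (by simp [List.isPrefixOf]; exact h)]
          rw [ih n (c' :: acc) (by simpa using hle)]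
          simp [hne]

-- replace on char lists with single-character old/new is List.map
theorem replace_single (s : List Char) (c d : Char) :
    PySem.Chars.replace s [c] [d] = s.map (fun x => if x = c then d else x) := by
  simp only [PySem.Chars.replace, List.isEmpty_cons, Bool.false_eq_true, if_false]
  rw [go_single c d s s.length [] (le_refl _)]
  simp

-- the composed digit→vowel substitution
def subst (c : Char) : Char :=
  if c = '0' then 'a' else if c = '1' then 'e' else if c = '2' then 'i'
  else if c = '3' then 'o' else if c = '4' then 'u' else c

theorem table_getD (c : Char) :
    (PySem.Dict.ofList [('0', 'a'), ('1', 'e'), ('2', 'i'), ('3', 'o'), ('4', 'u')]).getD c c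
      = subst c := by
  rw [show PySem.Dict.ofList [('0', 'a'), ('1', 'e'), ('2', 'i'), ('3', 'o'), ('4', 'u')]
        = PySem.Dict.mk [('0', 'a'), ('1', 'e'), ('2', 'i'), ('3', 'o'), ('4', 'u')] from by decide]
  unfold subst
  by_cases h0 : c = '0'
  · subst h0; decide
  by_cases h1 : c = '1'
  · subst h1; decide
  by_cases h2 : c = '2'
  · subst h2; decide
  by_cases h3 : c = '3'
  · subst h3; decide
  by_cases h4 : c = '4'
  · subst h4; decide
  simp [PySem.Dict.getD_eq_get?_getD, PySem.Dict.get?,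
        Ne.symm h0, Ne.symm h1, Ne.symm h2, Ne.symm h3, Ne.symm h4, h0, h1, h2, h3, h4]

theorem five_maps (s : List Char) :
    ((((s.map (fun x => if x = '0' then 'a' else x)).map
        (fun x => if x = '1' then 'e' else x)).map
        (fun x => if x = '2' then 'i' else x)).map
        (fun x => if x = '3' then 'o' else x)).map
        (fun x => if x = '4' then 'u' else x) = s.map subst := by
  simp only [List.map_map]
  apply List.map_congr_left
  intro c _
  simp only [Function.comp, subst]
  by_cases h0 : c = '0' <;> by_cases h1 : c = '1' <;> by_cases h2 : c = '2' <;>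
    by_cases h3 : c = '3' <;> by_cases h4 : c = '4' <;> simp_all

-- ===== VERDICT (by name: the statement is the Claim_ definition above) =====
theorem str_replace_single (m o n : String) (oc nc : Char)
    (ho : o.toList = [oc]) (hn : n.toList = [nc]) :
    PySem.Str.replace m o n
      = String.ofList (m.toList.map (fun x => if x = oc then nc else x)) := by
  simp [PySem.Str.replace, ho, hn, replace_single]

set_option maxHeartbeats 1000000 in
theorem karaca_decrypt_spec : Claim_equal_karaca_decrypt := by
  intro msg _
  unfold Spec_karaca_decrypt karaca_decrypt karaca_decrypt_alt
  rw [show PySem.List.pyRange 0 5 1 = [0, 1, 2, 3, 4] from by decide]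
  simp only [List.foldl]
  rw [show PySem.Str.slice msg (some 0) (some (-3)) = PySem.Str.slice msg none (some (-3)) from by
        simp [PySem.Str.slice]]
  set s := PySem.Str.slice msg none (some (-3)) with hs
  rw [show PySem.List.pyGetD ["0", "1", "2", "3", "4"] (0 : Int) "" = "0" from by decide,
      show PySem.List.pyGetD ["a", "e", "i", "o", "u"] (0 : Int) "" = "a" from by decide,
      show PySem.List.pyGetD ["0", "1", "2", "3", "4"] (1 : Int) "" = "1" from by decide,
      show PySem.List.pyGetD ["a", "e", "i", "o", "u"] (1 : Int) "" = "e" from by decide,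
      show PySem.List.pyGetD ["0", "1", "2", "3", "4"] (2 : Int) "" = "2" from by decide,
      show PySem.List.pyGetD ["a", "e", "i", "o", "u"] (2 : Int) "" = "i" from by decide,
      show PySem.List.pyGetD ["0", "1", "2", "3", "4"] (3 : Int) "" = "3" from by decide,
      show PySem.List.pyGetD ["a", "e", "i", "o", "u"] (3 : Int) "" = "o" from by decide,
      show PySem.List.pyGetD ["0", "1", "2", "3", "4"] (4 : Int) "" = "4" from by decide,
      show PySem.List.pyGetD ["a", "e", "i", "o", "u"] (4 : Int) "" = "u" from by decide]
  rw [str_replace_single _ "0" "a" '0' 'a' (by decide) (by decide)]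
  rw [str_replace_single _ "1" "e" '1' 'e' (by decide) (by decide)]
  rw [str_replace_single _ "2" "i" '2' 'i' (by decide) (by decide)]
  rw [str_replace_single _ "3" "o" '3' 'o' (by decide) (by decide)]
  rw [str_replace_single _ "4" "u" '4' 'u' (by decide) (by decide)]
  rw [PySem.Str.slice?_none_none_neg_one]
  simp only [Option.getD_some, String.toList_ofList]
  rw [five_maps]
  congr 1
  rw [List.map_reverse]
  apply congrArg
  apply List.map_congr_left
  intro c _
  exact (table_getD c).symm
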